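-- pv_equiv track=rewrite | github.com/miliar/Code_Jam_Webscraper | Solutions_python/Problem_178/1297.py | flip_first_pancakes
-- ===== SOURCE A (Python) =====
-- def flip_first_pancakes(pancake_seq):
--
--     side_of_first = pancake_seq[0]
--
--     if side_of_first == '-':
--         flipped_side = '+'
--     else:
--         flipped_side = '-'
--
--     flipped_pancake_seq = ''
--
--     flip = True
--     for pancake in pancake_seq:
--         if pancake == side_of_first and flip:
--             flipped_pancake_seq += flipped_side
--         else:
--             flipped_pancake_seq += pancake
--             flip = False
--
--     return flipped_pancake_seq
-- ===== SOURCE B (Python) =====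
-- def flip_first_pancakes(pancake_seq):
--     first = pancake_seq[0]
--     flipped = '+' if first == '-' else '-'
--     i = len(pancake_seq) - len(pancake_seq.lstrip(first))
--     return flipped * i + pancake_seq[i:]
-- ===== Notes on version B (the rewrite author's own statement) =====
-- stated objective: simpler
-- what changed: Replaces the character-by-character loop with a flip flag by computing the leading-run length via lstrip and building the result in bulk as flipped*i + suffix slice.
import Mathlib
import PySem

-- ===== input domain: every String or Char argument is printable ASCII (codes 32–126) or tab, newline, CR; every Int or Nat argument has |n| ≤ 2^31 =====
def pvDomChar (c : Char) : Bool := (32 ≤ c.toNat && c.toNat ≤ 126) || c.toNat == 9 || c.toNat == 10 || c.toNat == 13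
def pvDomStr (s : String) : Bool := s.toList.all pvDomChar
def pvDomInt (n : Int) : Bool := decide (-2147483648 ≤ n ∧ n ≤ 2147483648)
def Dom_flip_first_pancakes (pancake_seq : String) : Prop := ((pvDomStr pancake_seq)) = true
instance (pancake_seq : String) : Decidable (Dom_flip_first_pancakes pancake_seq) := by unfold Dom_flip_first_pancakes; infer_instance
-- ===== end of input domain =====

-- B replaces A's per-character loop with a flip flag by a leading-run count (lstrip) plus bulk construction: a simpler decomposition.


-- ===== PORT A =====
def flip_first_pancakes (pancake_seq : String) : String :=
  match PySem.Str.pyGet? pancake_seq 0 with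
  | none => ""  -- unreachable: Pre_ excludes the empty string (Python raises IndexError here)
  | some side_of_first =>
    let flipped_side : Char := if side_of_first = '-' then '+' else '-'
    let st := pancake_seq.toList.foldl
      (fun (st : List Char × Bool) pancake =>
        if (pancake == side_of_first) && st.2 then
          (st.1 ++ [flipped_side], st.2)
        else
          (st.1 ++ [pancake], false))
      ([], true)
    String.ofList st.1

-- ===== PORT B =====
def flip_first_pancakes_alt (pancake_seq : String) : String :=
  match PySem.Str.pyGet? pancake_seq 0 with
  | none => ""  -- unreachable: Pre_ excludes the empty string (Python raises IndexError here)
  | some first =>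
    let flipped : Char := if first = '-' then '+' else '-'
    -- lstrip(first) with a single-character argument: ported by hand as dropWhile (== first), exact
    let stripped := pancake_seq.toList.dropWhile (· == first)
    let i : Int := (pancake_seq.toList.length : Int) - (stripped.length : Int)
    String.ofList (List.replicate i.toNat flipped ++ PySem.List.slice pancake_seq.toList (some i) none)

-- ===== PRECONDITION & SPEC =====
-- Pre_ excludes only the empty string, on which Python A raises IndexError (pancake_seq[0]).
def Pre_flip_first_pancakes (pancake_seq : String) : Prop := pancake_seq.toList ≠ []
instance (pancake_seq : String) : Decidable (Pre_flip_first_pancakes pancake_seq) := by unfold Pre_flip_first_pancakes; infer_instance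
def pvWitness_flip_first_pancakes : String := "--+-"
def Spec_flip_first_pancakes (pancake_seq : String) (out : String) : Prop := out = flip_first_pancakes_alt pancake_seq
instance (pancake_seq : String) (out : String) : Decidable (Spec_flip_first_pancakes pancake_seq out) := by unfold Spec_flip_first_pancakes; infer_instance

-- ===== CLAIM (what is proved, stated in full; the proofs are below) =====
def Claim_equal_flip_first_pancakes : Prop := ∀ (pancake_seq : String), Dom_flip_first_pancakes pancake_seq → Pre_flip_first_pancakes pancake_seq → Spec_flip_first_pancakes pancake_seq (flip_first_pancakes pancake_seq)

-- ===== LEMMAS AND PROOFS =====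

-- once A's flag is False it stays False and the rest of the string is copied verbatim
theorem pvFoldFalse (f fl : Char) (l acc : List Char) :
    l.foldl (fun (st : List Char × Bool) c =>
        if (c == f) && st.2 then (st.1 ++ [fl], st.2) else (st.1 ++ [c], false))
      (acc, false) = (acc ++ l, false) := by
  induction l generalizing acc with
  | nil => simp
  | cons c t ih =>
    simp only [List.foldl_cons, Bool.and_false, Bool.false_eq_true, if_false]
    rw [ih]
    simp

-- with the flag True, A's fold flips the leading run of f and copies the rest
theorem pvFoldTrue (f fl : Char) (l acc : List Char) :
    (l.foldl (fun (st : List Char × Bool) c =>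
        if (c == f) && st.2 then (st.1 ++ [fl], st.2) else (st.1 ++ [c], false))
      (acc, true)).1
    = acc ++ List.replicate (l.takeWhile (· == f)).length fl ++ l.dropWhile (· == f) := by
  induction l generalizing acc with
  | nil => simp
  | cons c t ih =>
    by_cases hb : (c == f) = true
    · simp only [List.foldl_cons, Bool.and_true, hb, if_true]
      rw [ih]
      simp [hb, List.replicate_succ]
    · simp only [Bool.not_eq_true] at hb
      simp only [List.foldl_cons, Bool.and_true, hb, Bool.false_eq_true, if_false]
      rw [pvFoldFalse]
      simp [hb]

-- dropping the leading run is the same as dropWhile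
theorem pvDropEqDrop (f : Char) (l : List Char) :
    l.drop (l.takeWhile (· == f)).length = l.dropWhile (· == f) := by
  induction l with
  | nil => simp
  | cons c t ih =>
    by_cases hb : (c == f) = true
    · simp [hb, ih]
    · simp only [Bool.not_eq_true] at hb
      simp [hb]

-- ===== VERDICT (by name: the statement is the Claim_ definition above) =====
theorem flip_first_pancakes_spec : Claim_equal_flip_first_pancakes := by
  intro s _ hpre
  unfold Spec_flip_first_pancakes flip_first_pancakes flip_first_pancakes_alt
  obtain ⟨c, t, hs⟩ : ∃ c t, s.toList = c :: t := by
    cases h : s.toList with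
    | nil => exact absurd h hpre
    | cons c t => exact ⟨c, t, rfl⟩
  have hget : PySem.Str.pyGet? s 0 = some c := by
    simp [hs]
  rw [hget]
  simp only [hs, pvFoldTrue]
  have hlentw : ((c :: t).takeWhile (· == c)).length + ((c :: t).dropWhile (· == c)).length
      = (c :: t).length := by
    have h := congrArg List.length
      (List.takeWhile_append_dropWhile (p := (· == c)) (l := c :: t))
    rw [List.length_append] at h
    exact h
  have hlen : ((c :: t).length : Int) - (((c :: t).dropWhile (· == c)).length : Int)
      = (((c :: t).takeWhile (· == c)).length : Int) := by omega
  rw [hlen, PySem.List.slice_from _ (by positivity)]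
  simp [pvDropEqDrop]
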